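-- pv_equiv track=rewrite | github.com/tnblank77/LeetCode | 2390_RemovingStarsFromAString/solution.py | removeStarsInPlace
-- ===== SOURCE A (Python) =====
-- def removeStarsInPlace(s: str) -> str:
--     i = 0
--
--     # Go through string and look for stars
--     while(i < len(s)):
--         if(s[i] == '*'):
--             # Found star, trim it and previous character from strin
--             s = s[:(i-1)] + s[(i+1):]
--             i -= 1
--         else:
--             i += 1
--
--     return s
-- ===== SOURCE B (Python) =====
-- def removeStarsInPlace(s: str) -> str:
--     stack = []
--     for ch in s:
--         if ch == '*':
--             stack.pop()
--         else:
--             stack.append(ch)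
--     return ''.join(stack)
-- ===== Notes on version B (the rewrite author's own statement) =====
-- stated objective: faster
-- what changed: Replaces the repeated O(n) string slicing+concatenation inside the scan with a single left-to-right pass over a stack (push non-stars, pop on star, join once at the end).
-- outside the precondition, e.g. on removeStarsInPlace('*'): A raises IndexError, B raises IndexError; on removeStarsInPlace('a**'): A raises IndexError, B raises IndexError; on removeStarsInPlace('*a'): A does not finish within the time limit, B raises IndexError
import Mathlib
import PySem

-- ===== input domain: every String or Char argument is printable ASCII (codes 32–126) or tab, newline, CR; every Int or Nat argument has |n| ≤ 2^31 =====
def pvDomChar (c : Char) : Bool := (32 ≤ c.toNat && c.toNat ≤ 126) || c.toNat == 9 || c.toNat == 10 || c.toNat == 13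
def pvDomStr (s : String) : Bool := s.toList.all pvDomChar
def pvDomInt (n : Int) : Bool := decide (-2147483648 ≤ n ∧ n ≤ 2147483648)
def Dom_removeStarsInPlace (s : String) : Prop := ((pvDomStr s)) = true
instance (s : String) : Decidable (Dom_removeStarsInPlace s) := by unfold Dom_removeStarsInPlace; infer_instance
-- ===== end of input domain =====

-- B replaces A's in-place quadratic slice-and-reconcatenate scan by a single
-- stack pass (push non-stars, pop on '*', join once); equal wherever A returns.

-- ===== PORT A =====
-- A's while loop, step for step on the code points: fuel s.length is an upper
-- bound on the iterations A performs on any input admitted by Pre_ (each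
-- iteration consumes one not-yet-visited character); the fuel=0 fallback is a
-- totalization guard only, never reached under Pre_.
def pvLoopA : Nat → List Char → Int → List Char
  | 0, s, _ => s
  | fuel + 1, s, i =>
    if i < (s.length : Int) then
      if PySem.List.pyGet? s i = some '*' then
        pvLoopA fuel
          (PySem.List.slice s none (some (i - 1)) ++ PySem.List.slice s (some (i + 1)) none)
          (i - 1)
      else
        pvLoopA fuel s (i + 1)
    else s

def removeStarsInPlace (s : String) : String :=
  String.ofList (pvLoopA s.toList.length s.toList 0)

-- ===== PORT B =====
-- stack = []; for ch in s: pop on '*' else append; ''.join(stack).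
-- (stack.pop() on the empty stack raises in Python; that input is outside Pre_,
-- the port's dropLast there is a totalization guard.)
def removeStarsInPlace_alt (s : String) : String :=
  String.ofList (s.toList.foldl (fun st c => if c = '*' then st.dropLast else st ++ [c]) [])

-- ===== PRECONDITION & SPEC =====
-- Pre_ is the balance condition: at every '*', stars so far ≤ non-stars so far.
-- Outside it A never returns a value: when a star meets an empty prefix at i = 0,
-- 's[:(i-1)]' is 's[:-1]' (it drops the LAST character, not nothing), so A either
-- raises IndexError (e.g. on "*": s becomes "" with i = -1, and s[-1] on "" raises)
-- or loops forever (e.g. on "*a": s[:-1] + s[1:] = "*" + "a" leaves s unchanged);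
-- B's stack.pop() raises IndexError on those inputs too.
def Pre_removeStarsInPlace (s : String) : Prop :=
  ∀ i < s.toList.length,
    s.toList.getD i ' ' = '*' → 2 * ((s.toList.take (i + 1)).count '*') ≤ i + 1

instance (s : String) : Decidable (Pre_removeStarsInPlace s) := by
  unfold Pre_removeStarsInPlace; infer_instance

def pvWitness_removeStarsInPlace : String := "leet**cod*e"

def Spec_removeStarsInPlace (s : String) (out : String) : Prop := out = removeStarsInPlace_alt s
instance (s : String) (out : String) : Decidable (Spec_removeStarsInPlace s out) := by unfold Spec_removeStarsInPlace; infer_instance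

-- ===== CLAIM (what is proved, stated in full; the proofs are below) =====
def Claim_equal_removeStarsInPlace : Prop := ∀ (s : String), Dom_removeStarsInPlace s → Pre_removeStarsInPlace s → Spec_removeStarsInPlace s (removeStarsInPlace s)

-- ===== LEMMAS AND PROOFS =====

-- depth-d balance: scanning rest with d characters already on the stack, every
-- '*' finds a non-empty stack
def pvBal : Nat → List Char → Prop
  | _, [] => True
  | d, c :: r => if c = '*' then 0 < d ∧ pvBal (d - 1) r else pvBal (d + 1) r

theorem pvBal_of_counts (l : List Char) (d : Nat)
    (H : ∀ i < l.length, l.getD i ' ' = '*' → 2 * ((l.take (i + 1)).count '*') ≤ i + 1 + d) :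
    pvBal d l := by
  induction l generalizing d with
  | nil => trivial
  | cons c r ih =>
    by_cases hc : c = '*'
    · subst hc
      have h0 := H 0 (by simp) (by simp)
      simp at h0
      refine ⟨by omega, ?_⟩
      apply ih
      intro i hi hstar
      have := H (i + 1) (by simpa using Nat.succ_lt_succ hi) (by simpa using hstar)
      simp at this
      omega
    · simp only [pvBal, if_neg hc]
      apply ih
      intro i hi hstar
      have := H (i + 1) (by simpa using Nat.succ_lt_succ hi) (by simpa using hstar)
      simp [hc] at this
      omega

theorem pvLoopA_eq_stack (rest : List Char) :
    ∀ (pre : List Char) (fuel : Nat), rest.length ≤ fuel → '*' ∉ pre →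
      pvBal pre.length rest →
      pvLoopA fuel (pre ++ rest) (pre.length : Int) =
        rest.foldl (fun st c => if c = '*' then st.dropLast else st ++ [c]) pre := by
  induction rest with
  | nil =>
    intro pre fuel _ _ _
    cases fuel with
    | zero => simp [pvLoopA]
    | succ f => simp [pvLoopA]
  | cons c r ih =>
    intro pre fuel hfuel hpre hbal
    cases fuel with
    | zero => simp at hfuel
    | succ f =>
      have hf : r.length ≤ f := by simpa using hfuel
      have hlen : ((pre.length : Int)) < (((pre ++ c :: r).length : Nat) : Int) := by
        simp
      have hget : PySem.List.pyGet? (pre ++ c :: r) (pre.length : Int) = some c := by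
        rw [PySem.List.pyGet?_natCast]
        simp
      by_cases hc : c = '*'
      · subst hc
        rcases hbal with ⟨hd, hbal'⟩
        -- slice s none (i-1) = pre.dropLast ; slice s (i+1) none = r
        have hi1 : ((pre.length : Int)) - 1 = (((pre.length - 1 : Nat)) : Int) := by omega
        have hslice1 :
            PySem.List.slice (pre ++ '*' :: r) none (some ((pre.length : Int) - 1)) =
              pre.dropLast := by
          rw [hi1, PySem.List.slice_to_natCast]
          rw [List.take_append_of_le_length (by omega)]
          rw [List.dropLast_eq_take]
        have hslice2 :
            PySem.List.slice (pre ++ '*' :: r) (some ((pre.length : Int) + 1)) none = r := by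
          have : ((pre.length : Int)) + 1 = (((pre.length + 1 : Nat)) : Int) := by omega
          rw [this, PySem.List.slice_from_natCast]
          simp [List.drop_append]
        simp only [pvLoopA, if_pos hlen, hget, hslice1, hslice2]
        have hi' : ((pre.length : Int)) - 1 = ((pre.dropLast.length : Nat) : Int) := by
          simp [List.length_dropLast]; omega
        rw [hi']
        rw [ih pre.dropLast f hf (fun h => hpre (List.Sublist.subset (List.dropLast_sublist pre) h))
          (by simpa [List.length_dropLast] using hbal')]
        simp
      · have hbal' : pvBal (pre.length + 1) r := by
          simpa [pvBal, hc] using hbal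
        have hnote : PySem.List.pyGet? (pre ++ c :: r) (pre.length : Int) ≠ some '*' := by
          rw [hget]; simp [hc]
        have hre : pre ++ c :: r = (pre ++ [c]) ++ r := by simp
        simp only [pvLoopA, if_pos hlen, if_neg hnote]
        have hi' : ((pre.length : Int)) + 1 = (((pre ++ [c]).length : Nat) : Int) := by
          simp
        rw [hi', hre]
        rw [ih (pre ++ [c]) f hf (by simp [hpre]; exact fun h => hc h.symm) (by simpa using hbal')]
        simp [hc]

-- ===== VERDICT (by name: the statement is the Claim_ definition above) =====
theorem removeStarsInPlace_spec : Claim_equal_removeStarsInPlace := by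
  intro s _ hpre
  unfold Spec_removeStarsInPlace removeStarsInPlace removeStarsInPlace_alt
  have hbal : pvBal 0 s.toList := by
    apply pvBal_of_counts
    intro i hi hstar
    simpa using hpre i hi hstar
  apply congrArg String.ofList
  have := pvLoopA_eq_stack s.toList [] s.toList.length (le_refl _) (by simp)
    (by simpa using hbal)
  simpa using this
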